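-- pv_equiv track=rewrite | github.com/Lim3nius/aoc | 2024/02/main.py | diffs_in_report_ok
-- ===== SOURCE A (Python) =====
-- def diffs_in_report_ok(diffs: list[int]) -> bool:
--     first = diffs[0]
--     for d in diffs:
--         if not (1 <= abs(d) <= 3):
--             return False
--
--         if first > 0 and d < 0:
--             return False
--         elif first < 0 and d > 0:
--             return False
--
--     return True
-- ===== SOURCE B (Python) =====
-- def diffs_in_report_ok(diffs: list[int]) -> bool:
--     return all(1 <= d <= 3 for d in diffs) or all(-3 <= d <= -1 for d in diffs)
-- ===== Notes on version B (the rewrite author's own statement) =====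
-- stated objective: simpler
-- what changed: Replaces the per-element abs-plus-sign-against-first loop with two homogeneous range scans joined by 'or' (all diffs in [1,3] or all in [-3,-1]); no first-element sign state is consulted per element.
import Mathlib
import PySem

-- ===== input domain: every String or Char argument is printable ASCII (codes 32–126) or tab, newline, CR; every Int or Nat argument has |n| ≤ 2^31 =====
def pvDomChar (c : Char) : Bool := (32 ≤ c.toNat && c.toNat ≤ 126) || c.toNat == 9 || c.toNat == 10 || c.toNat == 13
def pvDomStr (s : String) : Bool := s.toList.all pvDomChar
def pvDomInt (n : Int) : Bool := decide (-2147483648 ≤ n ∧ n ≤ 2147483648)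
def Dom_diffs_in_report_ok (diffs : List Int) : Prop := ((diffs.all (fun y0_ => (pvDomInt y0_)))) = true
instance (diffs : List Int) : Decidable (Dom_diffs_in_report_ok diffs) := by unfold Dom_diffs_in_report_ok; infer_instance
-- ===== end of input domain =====

-- B replaces A's per-element abs + sign-against-first loop by two disjoined homogeneous
-- range scans (all diffs in [1,3] or all in [-3,-1]); Pre_ excludes the empty list, where A raises.


-- ===== PORT A =====
-- the for-loop with early returns, carrying the fixed first element
def pvALoop (first : Int) : List Int → Bool
  | [] => true
  | d :: rest =>
    if ¬ (1 ≤ |d| ∧ |d| ≤ 3) then false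
    else if first > 0 ∧ d < 0 then false
    else if first < 0 ∧ d > 0 then false
    else pvALoop first rest

def diffs_in_report_ok (diffs : List Int) : Bool :=
  match PySem.List.pyGet? diffs 0 with
  | none => false   -- unreachable under Pre_: Python raises IndexError here
  | some first => pvALoop first diffs

-- ===== PORT B =====
def diffs_in_report_ok_alt (diffs : List Int) : Bool :=
  diffs.all (fun d => decide (1 ≤ d) && decide (d ≤ 3)) ||
  diffs.all (fun d => decide (-3 ≤ d) && decide (d ≤ -1))

-- ===== PRECONDITION & SPEC =====
-- Pre_ excludes only the empty list, on which Python A raises IndexError at diffs[0].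
def Pre_diffs_in_report_ok (diffs : List Int) : Prop := diffs ≠ []
instance (diffs : List Int) : Decidable (Pre_diffs_in_report_ok diffs) := by unfold Pre_diffs_in_report_ok; infer_instance
def pvWitness_diffs_in_report_ok : List Int := [1, 2, 3]

def Spec_diffs_in_report_ok (diffs : List Int) (out : Bool) : Prop := out = diffs_in_report_ok_alt diffs
instance (diffs : List Int) (out : Bool) : Decidable (Spec_diffs_in_report_ok diffs out) := by unfold Spec_diffs_in_report_ok; infer_instance

-- ===== CLAIM (what is proved, stated in full; the proofs are below) =====
def Claim_equal_diffs_in_report_ok : Prop := ∀ (diffs : List Int), Dom_diffs_in_report_ok diffs → Pre_diffs_in_report_ok diffs → Spec_diffs_in_report_ok diffs (diffs_in_report_ok diffs)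

-- ===== LEMMAS AND PROOFS =====

-- with a positive first element, A's loop is exactly the "all in [1,3]" scan
theorem pvALoop_pos (first : Int) (h : 0 < first) :
    ∀ l : List Int, pvALoop first l = l.all (fun d => decide (1 ≤ d) && decide (d ≤ 3)) := by
  intro l
  induction l with
  | nil => rfl
  | cons d rest ih =>
    simp only [pvALoop, List.all_cons]
    by_cases h1 : 1 ≤ d ∧ d ≤ 3
    · have : ¬ ¬ (1 ≤ |d| ∧ |d| ≤ 3) := by rw [abs_of_pos (by omega)]; omega
      rw [if_neg this, if_neg (by omega), if_neg (by omega), ih]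
      simp [h1.1, h1.2]
    · have hd : (decide (1 ≤ d) && decide (d ≤ 3)) = false := by
        rcases not_and_or.mp h1 with h' | h' <;> simp [h']
      rw [hd, Bool.false_and]
      by_cases h2 : 1 ≤ |d| ∧ |d| ≤ 3
      · rw [if_neg (not_not_intro h2)]
        have hdneg : d < 0 := by rcases abs_cases d with ⟨he, _⟩ | ⟨_, hn⟩ <;> omega
        rw [if_pos ⟨h, hdneg⟩]
      · rw [if_pos h2]

-- with a negative first element, A's loop is exactly the "all in [-3,-1]" scan
theorem pvALoop_neg (first : Int) (h : first < 0) :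
    ∀ l : List Int, pvALoop first l = l.all (fun d => decide (-3 ≤ d) && decide (d ≤ -1)) := by
  intro l
  induction l with
  | nil => rfl
  | cons d rest ih =>
    simp only [pvALoop, List.all_cons]
    by_cases h1 : -3 ≤ d ∧ d ≤ -1
    · have : ¬ ¬ (1 ≤ |d| ∧ |d| ≤ 3) := by rw [abs_of_neg (by omega)]; omega
      rw [if_neg this, if_neg (by omega), if_neg (by omega), ih]
      simp [h1.1, h1.2]
    · have hd : (decide (-3 ≤ d) && decide (d ≤ -1)) = false := by
        rcases not_and_or.mp h1 with h' | h' <;> simp [h']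
      rw [hd, Bool.false_and]
      by_cases h2 : 1 ≤ |d| ∧ |d| ≤ 3
      · rw [if_neg (not_not_intro h2)]
        have hdpos : 0 < d := by rcases abs_cases d with ⟨he, _⟩ | ⟨_, hn⟩ <;> omega
        rw [if_neg (by omega), if_pos ⟨h, hdpos⟩]
      · rw [if_pos h2]

-- ===== VERDICT (by name: the statement is the Claim_ definition above) =====
theorem diffs_in_report_ok_spec : Claim_equal_diffs_in_report_ok := by
  intro diffs _ hpre
  unfold Spec_diffs_in_report_ok
  match diffs, hpre with
  | a :: t, _ =>
    have hget : PySem.List.pyGet? (a :: t) 0 = some a := by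
      simp [PySem.List.pyGet?, PySem.List.pyIdx?]
    show (match PySem.List.pyGet? (a :: t) 0 with
          | none => false
          | some first => pvALoop first (a :: t)) = diffs_in_report_ok_alt (a :: t)
    rw [hget]
    show pvALoop a (a :: t) = diffs_in_report_ok_alt (a :: t)
    unfold diffs_in_report_ok_alt
    rcases lt_trichotomy a 0 with ha | ha | ha
    · rw [pvALoop_neg a ha]
      have : ((a :: t).all fun d => decide (1 ≤ d) && decide (d ≤ 3)) = false := by
        simp only [List.all_cons]; simp [show ¬ (1 ≤ a) by omega]
      rw [this, Bool.false_or]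
    · subst ha
      have hstop : pvALoop 0 (0 :: t) = false := by
        simp [pvALoop]
      rw [hstop]
      simp only [List.all_cons]
      simp
    · rw [pvALoop_pos a ha]
      have : ((a :: t).all fun d => decide (-3 ≤ d) && decide (d ≤ -1)) = false := by
        simp only [List.all_cons]; simp [show ¬ (a ≤ -1) by omega]
      rw [this, Bool.or_false]
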